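-- pv_equiv track=rewrite | github.com/marekninja/aoc-2k24 | 9/solve-part2.py | search_for_block_reverse
-- ===== SOURCE A (Python) =====
-- def search_for_block_reverse(memory, accepted_value) -> tuple[int,int]:
--     first_idx = None
--     last_idx = None
--     block_complete = None
--     block_val = None
--     for idx in range(len(memory)-1, -1,-1):
--             if memory[idx] == accepted_value:
--                 if block_val != memory[idx]:
--                     block_val = memory[idx]
--                     last_idx = idx
--
--                 if idx - 1 >= 0:
--                     first_idx = idx
--                     block_complete = True if memory[idx -1] != block_val else False
--
--             if block_complete:
--                 return first_idx, last_idx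
--
--     return None, None
-- ===== SOURCE B (Python) =====
-- def search_for_block_reverse(memory, accepted_value) -> tuple[int, int]:
--     # Phase 1: one left-to-right pass remembering the last index holding the value.
--     end = None
--     for i, v in enumerate(memory):
--         if v == accepted_value:
--             end = i
--     if end is None:
--         return None, None
--     # Phase 2: walk left from the end of the run to find its start.
--     start = end
--     while start > 0 and memory[start - 1] == accepted_value:
--         start -= 1
--     # A block starting at index 0 cannot be confirmed (matches the original).
--     if start == 0:
--         return None, None
--     return start, end
-- ===== Notes on version B (the rewrite author's own statement) =====
-- stated objective: simpler
-- what changed: Replaces the fused reverse-scan state machine (first_idx/last_idx/block_complete/block_val juggled every iteration) with two plain phases: a forward pass recording the last index holding the value, then a short leftward walk to the run's start.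
import Mathlib
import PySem

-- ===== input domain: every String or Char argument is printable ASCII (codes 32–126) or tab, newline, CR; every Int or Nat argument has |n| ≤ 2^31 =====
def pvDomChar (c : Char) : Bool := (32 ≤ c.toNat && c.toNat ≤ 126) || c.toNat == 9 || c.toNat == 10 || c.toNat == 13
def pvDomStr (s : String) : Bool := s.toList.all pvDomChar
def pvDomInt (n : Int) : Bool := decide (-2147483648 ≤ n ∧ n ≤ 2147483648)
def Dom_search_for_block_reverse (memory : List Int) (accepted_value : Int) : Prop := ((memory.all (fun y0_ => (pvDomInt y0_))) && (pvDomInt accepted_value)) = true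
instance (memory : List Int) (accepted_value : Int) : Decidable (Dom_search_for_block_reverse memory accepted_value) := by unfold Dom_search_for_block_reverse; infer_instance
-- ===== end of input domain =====

-- B replaces A's fused reverse-scan state machine by two plain phases (find last match, walk left to run start); same O(n) cost, simpler decomposition.


-- ===== PORT A =====
-- state = (first_idx, last_idx, block_complete, block_val); block_complete's Python None/True/False is Option Bool.
-- memory[idx] is read with pyGetD _ _ 0: every idx the loop produces is in range, so this is exact.
def pvLoopA (memory : List Int) (av : Int) :
    List Int → (Option Int × Option Int × Option Bool × Option Int) → Option Int × Option Int
  | [], _ => (none, none)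
  | idx :: rest, (first_idx, last_idx, block_complete, block_val) =>
    let st : Option Int × Option Int × Option Bool × Option Int :=
      if PySem.List.pyGetD memory idx 0 = av then
        let m := PySem.List.pyGetD memory idx 0
        let (block_val', last_idx') :=
          if block_val ≠ some m then (some m, some idx) else (block_val, last_idx)
        if 0 ≤ idx - 1 then
          (some idx, last_idx', some (some (PySem.List.pyGetD memory (idx - 1) 0) ≠ block_val'), block_val')
        else
          (first_idx, last_idx', block_complete, block_val')
      else (first_idx, last_idx, block_complete, block_val)
    if st.2.2.1 = some true then (st.1, st.2.1) else pvLoopA memory av rest st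

def search_for_block_reverse (memory : List Int) (accepted_value : Int) : Option Int × Option Int :=
  pvLoopA memory accepted_value (PySem.List.pyRange ((memory.length : Int) - 1) (-1) (-1))
    (none, none, none, none)

-- ===== PORT B =====
-- phase 1 of Source B: forward pass, remember the last index whose element equals the value
def pvLastMatch (memory : List Int) (av : Int) : Option Int :=
  (PySem.List.enumerate memory 0).foldl (fun e p => if p.2 = av then some p.1 else e) none

-- phase 2 of Source B: 'while start > 0 and memory[start-1] == accepted_value: start -= 1'
def pvWalkLeft (memory : List Int) (av : Int) : Nat → Nat
  | 0 => 0
  | s + 1 => if PySem.List.pyGetD memory (s : Int) 0 = av then pvWalkLeft memory av s else s + 1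

def search_for_block_reverse_alt (memory : List Int) (accepted_value : Int) : Option Int × Option Int :=
  match pvLastMatch memory accepted_value with
  | none => (none, none)
  | some e =>
    let s := pvWalkLeft memory accepted_value e.toNat
    if s = 0 then (none, none) else ((s : Int), some e)

-- ===== PRECONDITION & SPEC =====
def Spec_search_for_block_reverse (memory : List Int) (accepted_value : Int) (out : Option Int × Option Int) : Prop := out = search_for_block_reverse_alt memory accepted_value
instance (memory : List Int) (accepted_value : Int) (out : Option Int × Option Int) : Decidable (Spec_search_for_block_reverse memory accepted_value out) := by unfold Spec_search_for_block_reverse; infer_instance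

-- ===== CLAIM (what is proved, stated in full; the proofs are below) =====
def Claim_equal_search_for_block_reverse : Prop := ∀ (memory : List Int) (accepted_value : Int), Dom_search_for_block_reverse memory accepted_value → Spec_search_for_block_reverse memory accepted_value (search_for_block_reverse memory accepted_value)

-- ===== LEMMAS AND PROOFS =====

theorem pv_enumerate_append (xs ys : List Int) (s : Int) :
    PySem.List.enumerate (xs ++ ys) s
      = PySem.List.enumerate xs s ++ PySem.List.enumerate ys (s + xs.length) := by
  induction xs generalizing s with
  | nil => simp [PySem.List.enumerate_nil]
  | cons x xs ih =>
      simp [PySem.List.enumerate_cons, ih (s + 1)]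
      ring_nf

theorem pv_lastMatch_append (xs : List Int) (x av : Int) :
    pvLastMatch (xs ++ [x]) av
      = if x = av then some (xs.length : Int) else pvLastMatch xs av := by
  unfold pvLastMatch
  rw [pv_enumerate_append, List.foldl_append]
  simp [PySem.List.enumerate_cons, PySem.List.enumerate_nil]

theorem pv_lastMatch_spec (xs : List Int) (av : Int) :
    (pvLastMatch xs av = none → av ∉ xs) ∧
    (∀ e : Int, pvLastMatch xs av = some e →
      0 ≤ e ∧ e.toNat < xs.length ∧ xs[e.toNat]? = some av ∧
      ∀ i : Nat, e.toNat < i → i < xs.length → xs[i]? ≠ some av) := by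
  induction xs using List.reverseRecOn with
  | nil =>
      constructor
      · intro _; simp
      · intro e he; simp [pvLastMatch, PySem.List.enumerate_nil] at he
  | append_singleton xs x ih =>
      rw [pv_lastMatch_append] at *
      by_cases hx : x = av
      · simp only [hx]
        constructor
        · intro h; cases h
        · intro e he
          have he' : e = (xs.length : Int) := by exact (Option.some_inj.mp he).symm
          subst he'
          refine ⟨by positivity, by simp, ?_, ?_⟩
          · simp
          · intro i hi hlen
            simp at hlen; omega
      · simp only [if_neg hx]
        constructor
        · intro h hmem
          rcases List.mem_append.mp hmem with h1 | h2
          · exact (ih.1 h) h1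
          · simp at h2; exact hx h2.symm
        · intro e he
          obtain ⟨h0, hlt, hget, habove⟩ := ih.2 e he
          refine ⟨h0, by simp; omega, ?_, ?_⟩
          · rw [List.getElem?_append_left hlt]; exact hget
          · intro i hi hlen
            simp at hlen
            by_cases hi2 : i < xs.length
            · rw [List.getElem?_append_left hi2]; exact habove i hi hi2
            · have : i = xs.length := by omega
              subst this
              rw [List.getElem?_concat_length]
              simp only [ne_eq, Option.some.injEq]
              exact hx

-- A's loop passes unchanged over indices that do not hold the value.
theorem pv_skipA (memory : List Int) (av : Int) (l rest : List Int)
    (st : Option Int × Option Int × Option Bool × Option Int)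
    (hno : ∀ i ∈ l, PySem.List.pyGetD memory i 0 ≠ av)
    (hbc : st.2.2.1 ≠ some true) :
    pvLoopA memory av (l ++ rest) st = pvLoopA memory av rest st := by
  induction l with
  | nil => rfl
  | cons i l ih =>
      obtain ⟨f, la, bc, bv⟩ := st
      have hni : PySem.List.pyGetD memory i 0 ≠ av := hno i (by simp)
      simp only [List.cons_append, pvLoopA, if_neg hni]
      simp only at hbc
      rw [if_neg hbc]
      exact ih (fun j hj => hno j (by simp [hj]))

-- A's loop inside a run: state (·, some e, some false, some av), current index j holds the value.
theorem pv_runA (memory : List Int) (av : Int) (e : Int) :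
    ∀ (j : Nat), PySem.List.pyGetD memory (j : Int) 0 = av → ∀ (f : Option Int),
    pvLoopA memory av (PySem.List.pyRange (j : Int) (-1) (-1)) (f, some e, some false, some av)
      = (if pvWalkLeft memory av j = 0 then (none, none)
         else ((pvWalkLeft memory av j : Int), some e)) := by
  intro j
  induction j with
  | zero =>
      intro hj f
      rw [PySem.List.pyRange_neg_one_cons (by norm_num)]
      have hnil : PySem.List.pyRange ((0 : Int) - 1) (-1) (-1) = [] :=
        PySem.List.pyRange_neg_one_eq_nil (by norm_num)
      simp only [Nat.cast_zero] at hj ⊢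
      simp only [pvLoopA, hj, hnil]
      norm_num [pvWalkLeft, pvLoopA]
  | succ k ih =>
      intro hj f
      have hj' : PySem.List.pyGetD memory ((k : Int) + 1) 0 = av := by push_cast at hj; exact hj
      have hcons : PySem.List.pyRange ((k : Int) + 1) (-1) (-1)
          = ((k : Int) + 1) :: PySem.List.pyRange ((k : Int)) (-1) (-1) := by
        have := PySem.List.pyRange_neg_one_cons (a := (k : Int) + 1) (b := -1) (by omega)
        simpa using this
      push_cast
      rw [hcons]
      simp only [pvLoopA, hj', show ((k : Int) + 1 - 1) = (k : Int) from by ring]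
      have hk2eq : PySem.List.pyGetD memory ((k : Int)) 0 = memory[k]?.getD 0 := by
        simp [List.getD_eq_getElem?_getD]
      by_cases hk : PySem.List.pyGetD memory (k : Int) 0 = av
      · have hk2 : memory[k]?.getD 0 = av := hk2eq ▸ hk
        simp only [hk]
        simp only [ne_eq, not_true_eq_false, if_false, Option.some.injEq, decide_false,
          if_pos (Int.natCast_nonneg k)]
        rw [if_pos trivial]
        rw [if_neg (by simp)]
        rw [ih hk (some ((k : Int) + 1))]
        simp [pvWalkLeft, hk2]
      · have hk2 : memory[k]?.getD 0 ≠ av := hk2eq ▸ hk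
        simp only [ne_eq, not_true_eq_false, if_false, Option.some.injEq,
          if_pos (Int.natCast_nonneg k)]
        rw [if_pos trivial]
        rw [if_pos (by simp; exact hk2)]
        simp [pvWalkLeft, hk2]

theorem pv_main (memory : List Int) (av : Int) :
    search_for_block_reverse memory av = search_for_block_reverse_alt memory av := by
  unfold search_for_block_reverse search_for_block_reverse_alt
  obtain ⟨hnone, hsome⟩ := pv_lastMatch_spec memory av
  cases hlm : pvLastMatch memory av with
  | none =>
      have hmem := hnone hlm
      have hall : ∀ i ∈ PySem.List.pyRange ((memory.length : Int) - 1) (-1) (-1),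
          PySem.List.pyGetD memory i 0 ≠ av := by
        intro i hi hEq
        rw [PySem.List.mem_pyRange_neg_one] at hi
        have hin : PySem.Raise.InRange memory.length i := by
          unfold PySem.Raise.InRange; omega
        have := PySem.List.pyGetD_mem (xs := memory) (i := i) (d := 0) hin
        rw [hEq] at this
        exact hmem this
      have := pv_skipA memory av _ [] (none, none, none, none) hall (by simp)
      simpa [pvLoopA] using this
  | some e =>
      obtain ⟨h0, hlt, hget, habove⟩ := hsome e hlm
      have heq : ((e.toNat : Int)) = e := Int.toNat_of_nonneg h0
      -- split the countdown range at e
      have hsplit : PySem.List.pyRange ((memory.length : Int) - 1) (-1) (-1)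
          = (PySem.List.pyRange (e + 1) (memory.length) 1).reverse
            ++ PySem.List.pyRange e (-1) (-1) := by
        rw [PySem.List.pyRange_neg_one_eq_reverse]
        have h2 : ((memory.length : Int) - 1 + 1) = (memory.length : Int) := by ring
        have h3 : ((-1 : Int) + 1) = 0 := by ring
        rw [h2, h3]
        rw [PySem.List.pyRange_one_append 0 (e + 1) (memory.length) (by omega) (by omega)]
        rw [List.reverse_append]
        congr 1
        rw [PySem.List.pyRange_neg_one_eq_reverse]
        norm_num
      rw [hsplit]
      have hg : ∀ i : Int, e < i → i < (memory.length : Int) →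
          PySem.List.pyGetD memory i 0 ≠ av := by
        intro i h1 h2 hEq
        have h0i : 0 ≤ i := by omega
        have hlti : i.toNat < memory.length := by omega
        apply habove i.toNat (by omega) hlti
        rw [List.getElem?_eq_getElem hlti]
        rw [PySem.List.pyGetD_eq_getElem (xs := memory) (i := i) (d := 0) h0i (by omega)] at hEq
        rw [hEq]
      rw [pv_skipA memory av _ _ _
        (by intro i hi
            rw [List.mem_reverse, PySem.List.mem_pyRange_one] at hi
            exact hg i (by omega) (by omega)) (by simp)]
      -- first matching step at idx = e
      have hge : PySem.List.pyGetD memory e 0 = av := by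
        rw [← heq, PySem.List.pyGetD_natCast]
        rw [List.getElem?_eq_getElem hlt] at hget
        rw [List.getD_eq_getElem?_getD, List.getElem?_eq_getElem hlt]
        simpa using hget
      rcases Nat.eq_zero_or_pos e.toNat with hz | hpos
      · -- run ends at index 0
        have he0 : e = 0 := by omega
        subst he0
        rw [PySem.List.pyRange_neg_one_cons (by norm_num)]
        have hnil : PySem.List.pyRange ((0 : Int) - 1) (-1) (-1) = [] :=
          PySem.List.pyRange_neg_one_eq_nil (by norm_num)
        simp [pvLoopA, hge, hnil, pvWalkLeft]
      · -- e ≥ 1: one unfolding, then case on the left neighbour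
        rw [PySem.List.pyRange_neg_one_cons (by omega)]
        simp only [pvLoopA, hge, ne_eq, reduceCtorEq, not_false_eq_true, if_true]
        rw [if_pos (show (0 : Int) ≤ e - 1 by omega)]
        obtain ⟨k, hk⟩ : ∃ k : Nat, e.toNat = k + 1 := ⟨e.toNat - 1, by omega⟩
        have hek : e = (k : Int) + 1 := by omega
        have he1 : e - 1 = (k : Int) := by omega
        rw [he1]
        have hk2eq : PySem.List.pyGetD memory ((k : Int)) 0 = memory[k]?.getD 0 := by
          simp [List.getD_eq_getElem?_getD]
        by_cases hleft : PySem.List.pyGetD memory ((k : Int)) 0 = av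
        · -- still in the run: continue with pv_runA
          have hleft2 : memory[k]?.getD 0 = av := hk2eq ▸ hleft
          simp only [hleft, not_true_eq_false, decide_false, Option.some.injEq]
          rw [if_neg (by simp)]
          rw [pv_runA memory av e k hleft (some e)]
          simp [pvWalkLeft, hk, hleft2]
        · -- run starts at e: return immediately
          have hleft2 : memory[k]?.getD 0 ≠ av := hk2eq ▸ hleft
          rw [if_pos (by simp; exact hleft2)]
          simp [pvWalkLeft, hleft2, hek]

-- ===== VERDICT (by name: the statement is the Claim_ definition above) =====
theorem search_for_block_reverse_spec : Claim_equal_search_for_block_reverse := by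
  intro memory av _
  unfold Spec_search_for_block_reverse
  exact pv_main memory av
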